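-- pv_equiv track=rewrite | github.com/omung789/FPL-Player-Points-Predictor | best_teams/best_team_per_gameweek.py | max_3_per_team
-- ===== SOURCE A (Python) =====
-- def max_3_per_team(players):
--     team_count = {}
--     for player in players:
--         if player[0][:3] in team_count:
--             team_count[player[0][:3]] += 1
--         else:
--             team_count[player[0][:3]] = 1
--     return max(team_count.values()) <= 3
-- ===== SOURCE B (Python) =====
-- def max_3_per_team(players):
--     keys = sorted(p[0][:3] for p in players)
--     runs = []
--     run = 0
--     prev = None
--     for k in keys:
--         if run > 0 and k == prev:
--             run += 1
--         else:
--             if run > 0: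
--                 runs.append(run)
--             run = 1
--         prev = k
--     if run > 0:
--         runs.append(run)
--     return max(runs) <= 3
-- ===== Notes on version B (the rewrite author's own statement) =====
-- stated objective: alternative
-- what changed: The dict counter is replaced by sort-then-scan: B sorts the 3-char prefixes, walks the sorted list once collecting run lengths of consecutive equal prefixes, and returns max(run lengths) <= 3; sorting makes equal prefixes adjacent, so the run lengths are exactly the per-team counts.
import Mathlib
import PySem

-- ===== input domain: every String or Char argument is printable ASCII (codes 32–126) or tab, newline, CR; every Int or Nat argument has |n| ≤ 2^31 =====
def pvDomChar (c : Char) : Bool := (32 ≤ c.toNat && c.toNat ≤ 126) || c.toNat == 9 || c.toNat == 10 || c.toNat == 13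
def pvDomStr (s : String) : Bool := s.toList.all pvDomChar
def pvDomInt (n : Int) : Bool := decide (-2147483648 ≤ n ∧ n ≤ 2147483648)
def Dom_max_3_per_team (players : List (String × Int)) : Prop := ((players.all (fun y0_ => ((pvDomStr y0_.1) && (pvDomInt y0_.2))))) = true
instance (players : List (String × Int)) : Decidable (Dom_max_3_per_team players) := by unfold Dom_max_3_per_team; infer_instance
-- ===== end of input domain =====

-- B replaces A's dict counting by sort-then-scan: sort the 3-char prefixes, walk once collecting
-- run lengths of consecutive equal prefixes, and check max run length ≤ 3 (alternative algorithm).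

-- ===== PORT A =====
def max_3_per_team (players : List (String × Int)) : Bool :=
  let team_count := players.foldl (fun d player =>
    let k := PySem.Str.slice player.1 none (some 3)
    if d.contains k then d.insert k (d.getD k 0 + 1) else d.insert k 1)
    (PySem.Dict.empty : PySem.Dict String Int)
  -- max(...) raises ValueError on an empty dict: excluded by Pre_; 'none' branch unreachable there
  match PySem.List.max? team_count.values (fun v => v) with
  | none => false
  | some m => decide (m ≤ 3)

-- ===== PORT B =====
-- loop body of Source B: state (runs, run, prev)
def pvRunStep (s : List Int × Int × Option String) (k : String) : List Int × Int × Option String :=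
  if 0 < s.2.1 ∧ s.2.2 = some k then (s.1, s.2.1 + 1, some k)
  else ((if 0 < s.2.1 then s.1 ++ [s.2.1] else s.1), 1, some k)

-- the trailing 'if run > 0: runs.append(run)'
def pvFinish (s : List Int × Int × Option String) : List Int :=
  if 0 < s.2.1 then s.1 ++ [s.2.1] else s.1

def max_3_per_team_alt (players : List (String × Int)) : Bool :=
  let keys := PySem.List.sorted (players.map (fun p => PySem.Str.slice p.1 none (some 3))) (fun v => v) false
  let runs := pvFinish (keys.foldl pvRunStep ([], 0, none))
  -- max(...) raises ValueError when runs = []: excluded by Pre_; 'none' branch unreachable there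
  match PySem.List.max? runs (fun v => v) with
  | none => false
  | some m => decide (m ≤ 3)

-- ===== PRECONDITION & SPEC =====
-- Pre_ excludes only the empty list, on which Python A (max of an empty dict's values) raises ValueError.
def Pre_max_3_per_team (players : List (String × Int)) : Prop := players ≠ []
instance (players : List (String × Int)) : Decidable (Pre_max_3_per_team players) := by unfold Pre_max_3_per_team; infer_instance
def pvWitness_max_3_per_team : (List (String × Int)) := [("ARSmid", 5), ("ARSfwd", 7), ("CHEdef", 2)]

def Spec_max_3_per_team (players : List (String × Int)) (out : Bool) : Prop := out = max_3_per_team_alt players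
instance (players : List (String × Int)) (out : Bool) : Decidable (Spec_max_3_per_team players out) := by unfold Spec_max_3_per_team; infer_instance

-- ===== CLAIM (what is proved, stated in full; the proofs are below) =====
def Claim_equal_max_3_per_team : Prop := ∀ (players : List (String × Int)), Dom_max_3_per_team players → Pre_max_3_per_team players → Spec_max_3_per_team players (max_3_per_team players)

-- ===== LEMMAS AND PROOFS =====

-- counts of the distinct elements of l, in first-occurrence order (= Counter(l).values())
def pvCounts (l : List String) : List Int :=
  (PySem.Set.ofList l).map (fun t => (l.count t : Int))

-- A's fold step is extensionally the running-counter step: when the key is absent, getD gives 0.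
theorem pv_step_eq (d : PySem.Dict String Int) (k : String) :
    (if d.contains k then d.insert k (d.getD k 0 + 1) else d.insert k 1)
      = d.insert k (d.getD k 0 + 1) := by
  by_cases h : d.contains k = true
  · simp [h]
  · have h' : d.contains k = false := by simpa using h
    rw [PySem.Dict.getD_of_not_contains _ _ h']
    simp [h']

-- A's dict is Counter(prefixes), so its values are pvCounts prefixes.
theorem pv_values_eq_counts (players : List (String × Int)) :
    (players.foldl (fun d player =>
      let k := PySem.Str.slice player.1 none (some 3)
      if d.contains k then d.insert k (d.getD k 0 + 1) else d.insert k 1)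
      (PySem.Dict.empty : PySem.Dict String Int)).values
    = pvCounts (players.map (fun p => PySem.Str.slice p.1 none (some 3))) := by
  have h : players.foldl (fun d player =>
      let k := PySem.Str.slice player.1 none (some 3)
      if d.contains k then d.insert k (d.getD k 0 + 1) else d.insert k 1)
      (PySem.Dict.empty : PySem.Dict String Int)
    = PySem.Dict.counter (players.map (fun p => PySem.Str.slice p.1 none (some 3))) := by
    rw [← PySem.Dict.foldl_insert_getD_add_one_eq_counter, List.foldl_map]
    apply PySem.List.foldl_congr_mem
    intro d p _
    exact pv_step_eq d _
  rw [h]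
  show (PySem.Dict.counter _).items.map (·.2) = _
  rw [PySem.Dict.items_counter]
  simp [pvCounts, List.map_map, Function.comp]

-- two lists of distinct elements with the same members are permutations
theorem pv_perm_of_nodup_mem {l₁ l₂ : List String} (h₁ : l₁.Nodup) (h₂ : l₂.Nodup)
    (hm : ∀ x, x ∈ l₁ ↔ x ∈ l₂) : l₁.Perm l₂ := by
  apply List.perm_iff_count.mpr
  intro x
  by_cases hx : x ∈ l₁
  · rw [List.count_eq_one_of_mem h₁ hx, List.count_eq_one_of_mem h₂ ((hm x).mp hx)]
  · rw [List.count_eq_zero_of_not_mem hx,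
        List.count_eq_zero_of_not_mem (fun h => hx ((hm x).mpr h))]

-- peeling the first run off pvCounts (as a multiset)
theorem pv_counts_cons_perm (x : String) (t : List String) :
    (pvCounts (x :: t)).Perm ((1 + (t.count x : Int)) :: pvCounts (t.filter (fun y => y ≠ x))) := by
  have hperm : (PySem.Set.ofList (x :: t)).Perm
      (x :: PySem.Set.ofList (t.filter (fun y => y ≠ x))) := by
    apply pv_perm_of_nodup_mem (PySem.Set.nodup_ofList _)
    · refine List.nodup_cons.mpr ⟨?_, PySem.Set.nodup_ofList _⟩
      intro hx
      have := (PySem.Set.mem_ofList _ _).mp hx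
      simp at this
    · intro u
      rw [PySem.Set.mem_ofList]
      simp only [List.mem_cons, PySem.Set.mem_ofList, List.mem_filter]
      constructor
      · rintro (rfl | hu)
        · exact Or.inl rfl
        · by_cases hux : u = x
          · exact Or.inl hux
          · exact Or.inr ⟨hu, by simpa using hux⟩
      · rintro (rfl | ⟨hu, _⟩)
        · exact Or.inl rfl
        · exact Or.inr hu
  have hmap := hperm.map (fun t' => (((x :: t).count t' : Nat) : Int))
  refine (hmap.trans ?_)
  rw [List.map_cons]
  have hhead : (((x :: t).count x : Nat) : Int) = 1 + (t.count x : Int) := by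
    rw [List.count_cons_self]; push_cast; ring
  rw [hhead]
  apply List.Perm.cons
  apply List.Perm.of_eq
  apply List.map_congr_left
  intro u hu
  have hu' := (PySem.Set.mem_ofList _ _).mp hu
  rw [List.mem_filter] at hu'
  have hux : u ≠ x := by simpa using hu'.2
  have hnat : List.count u (x :: t) = List.count u (List.filter (fun y => decide (y ≠ x)) t) := by
    rw [List.count_cons_of_ne hux.symm, List.count_filter (by simp [hux])]
  exact_mod_cast congrArg (fun n : Nat => (n : Int)) hnat

-- main loop invariant: on a sorted tail l whose elements all dominate the current run value a,
-- the finished runs list is (as a multiset) the accumulated runs, the completed current run,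
-- and the counts of the remaining distinct values.
theorem pv_run_loop (l : List String) (rs : List Int) (c : Int) (a : String)
    (hs : l.Pairwise (· ≤ ·)) (ha : ∀ x ∈ l, a ≤ x) (hc : 0 < c) :
    (pvFinish (l.foldl pvRunStep (rs, c, some a))).Perm
      (rs ++ (c + (l.count a : Int)) :: pvCounts (l.filter (fun y => y ≠ a))) := by
  induction l generalizing rs c a with
  | nil =>
      simp [pvFinish, pvCounts, hc]
  | cons x t ih =>
      rw [List.pairwise_cons] at hs
      by_cases hx : x = a
      · subst hx
        have hstep : pvRunStep (rs, c, some x) x = (rs, c + 1, some x) := by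
          simp [pvRunStep, hc]
        rw [List.foldl_cons, hstep]
        have := ih rs (c + 1) x hs.2 hs.1 (by omega)
        refine this.trans ?_
        have h1 : (c + 1 + (t.count x : Int)) = c + (((x :: t).count x : Nat) : Int) := by
          rw [List.count_cons_self]; push_cast; ring
        rw [h1]
        have h2 : (x :: t).filter (fun y => y ≠ x) = t.filter (fun y => y ≠ x) := by
          simp
        rw [h2]
      · have hax' : ¬ a = x := fun h => hx h.symm
        have hax : a < x := lt_of_le_of_ne (ha x (List.mem_cons_self)) hax'
        have hat : a ∉ t := fun h => absurd (hs.1 a h) (not_le.mpr hax)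
        have hstep : pvRunStep (rs, c, some a) x = (rs ++ [c], 1, some x) := by
          simp [pvRunStep, hc, hax']
        rw [List.foldl_cons, hstep]
        have := ih (rs ++ [c]) 1 x hs.2 hs.1 (by omega)
        refine this.trans ?_
        have hca : (x :: t).count a = 0 := by
          rw [List.count_eq_zero]
          simp [hat, hax']
        have hfa : (x :: t).filter (fun y => y ≠ a) = x :: t := by
          rw [List.filter_cons_of_pos (by simpa using hx), List.filter_eq_self.mpr]
          intro y hy
          simpa using fun h : y = a => hat (h ▸ hy)
        rw [hca, hfa, List.append_assoc]
        simp only [List.cons_append, List.nil_append, Nat.cast_zero, add_zero]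
        apply List.Perm.append_left
        apply List.Perm.cons
        exact (pv_counts_cons_perm x t).symm

-- B's finished runs list is a permutation of the counts of the distinct sorted keys.
theorem pv_runs_perm_counts (l : List String) (hs : l.Pairwise (· ≤ ·)) :
    (pvFinish (l.foldl pvRunStep ([], 0, none))).Perm (pvCounts l) := by
  cases l with
  | nil => simp [pvFinish, pvCounts]
  | cons x t =>
      rw [List.pairwise_cons] at hs
      have hstep : pvRunStep ([], 0, none) x = ([], 1, some x) := by
        simp [pvRunStep]
      rw [List.foldl_cons, hstep]
      have := pv_run_loop t [] 1 x hs.2 hs.1 (by omega)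
      refine this.trans ?_
      simp only [List.nil_append]
      exact (pv_counts_cons_perm x t).symm

-- the final 'max(vals) <= 3' test only depends on the multiset of values
theorem pv_max_le_congr_perm (l₁ l₂ : List Int) (hp : l₁.Perm l₂) :
    (match PySem.List.max? l₁ (fun v => v) with
     | none => false
     | some m => decide (m ≤ 3))
    = (match PySem.List.max? l₂ (fun v => v) with
       | none => false
       | some m => decide (m ≤ 3)) := by
  cases h₁ : PySem.List.max? l₁ (fun v => v) with
  | none =>
      have : l₁ = [] := (PySem.List.max?_eq_none_iff _ _).mp h₁
      subst this
      have : l₂ = [] := hp.nil_eq.symm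
      subst this
      rfl
  | some m₁ =>
      cases h₂ : PySem.List.max? l₂ (fun v => v) with
      | none =>
          have : l₂ = [] := (PySem.List.max?_eq_none_iff _ _).mp h₂
          subst this
          have h0 : l₁ = [] := hp.eq_nil
          subst h0
          rw [(PySem.List.max?_eq_none_iff _ _).mpr rfl] at h₁
          cases h₁
      | some m₂ =>
          have hm₁ : m₁ ∈ l₁ := PySem.List.max?_mem h₁
          have hm₂ : m₂ ∈ l₂ := PySem.List.max?_mem h₂
          have h12 : m₁ ≤ m₂ := PySem.List.max?_isMax h₂ m₁ (hp.mem_iff.mp hm₁)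
          have h21 : m₂ ≤ m₁ := PySem.List.max?_isMax h₁ m₂ (hp.mem_iff.mpr hm₂)
          have : m₁ = m₂ := le_antisymm h12 h21
          subst this
          rfl

theorem max_3_per_team_eq_alt (players : List (String × Int)) :
    max_3_per_team players = max_3_per_team_alt players := by
  simp only [max_3_per_team, max_3_per_team_alt]
  rw [pv_values_eq_counts]
  set prefixes := players.map (fun p => PySem.Str.slice p.1 none (some 3)) with hpref
  set keys := PySem.List.sorted prefixes (fun v => v) false with hkeys
  have hperm : keys.Perm prefixes := PySem.List.sorted_perm _ _ _
  have hsorted : keys.Pairwise (· ≤ ·) := PySem.List.sorted_pairwise prefixes (fun v => v)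
  apply pv_max_le_congr_perm
  -- pvCounts prefixes ~ pvCounts keys ~ B's runs
  have hsets : (PySem.Set.ofList prefixes).Perm (PySem.Set.ofList keys) := by
    apply pv_perm_of_nodup_mem (PySem.Set.nodup_ofList _) (PySem.Set.nodup_ofList _)
    intro x
    rw [PySem.Set.mem_ofList, PySem.Set.mem_ofList, hperm.mem_iff]
  have hcounts : (pvCounts prefixes).Perm (pvCounts keys) := by
    have hmap := hsets.map (fun t => ((prefixes.count t : Nat) : Int))
    refine hmap.trans (List.Perm.of_eq ?_)
    apply List.map_congr_left
    intro u _
    rw [hperm.count_eq]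
  exact hcounts.trans (pv_runs_perm_counts keys hsorted).symm

-- ===== VERDICT (by name: the statement is the Claim_ definition above) =====
theorem max_3_per_team_spec : Claim_equal_max_3_per_team := by
  intro players _ _
  unfold Spec_max_3_per_team
  exact max_3_per_team_eq_alt players
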